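-- pv_equiv track=rewrite | github.com/zjlab-BioGene/AMP-SEMiner | Seq_Tok_CLS_2_steps/pred_Token.2_steps.py | token2seq_lab
-- ===== SOURCE A (Python) =====
-- def token2seq_lab(lab, min_seg_len):
--     pos_count_best = 0
--     pos_count = 0
--     n_segments = 0
--     for i in range(len(lab)):
--         if lab[i] == 1:
--             pos_count += 1
--             if (i == 0) or (lab[i-1] == 0):
--                 n_segments += 1
--         else:
--             if pos_count > pos_count_best:
--                 pos_count_best = pos_count
--                 pos_count = 0
--             else:
--                 pos_count = 0
--                 continue
--     if pos_count > pos_count_best: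
--         pos_count_best = pos_count
--         pos_count = 0
--
--     tag = 1 if pos_count_best >= min_seg_len else 0
--     return tag, n_segments
-- ===== SOURCE B (Python) =====
-- def token2seq_lab(lab, min_seg_len):
--     # run-length encode lab
--     runs = []
--     for x in lab:
--         if runs and runs[-1][0] == x:
--             runs[-1][1] += 1
--         else:
--             runs.append([x, 1])
--     best = max((n for v, n in runs if v == 1), default=0)
--     # a segment starts where cur == 1 and the previous element is exactly 0
--     # (at index 0 the virtual previous element is 0)
--     n_segments = sum(1 for prev, cur in zip([0] + lab, lab) if cur == 1 and prev == 0)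
--     return (1 if best >= min_seg_len else 0), n_segments
-- ===== Notes on version B (the rewrite author's own statement) =====
-- stated objective: simpler
-- what changed: Replaces A's fused index loop with mutable best/pos/nseg state by two independent passes: a run-length encoding whose max 1-run length gives the tag, and a prev/cur zip count of positions where cur==1 and prev==0 for the segment count.
import Mathlib
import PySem

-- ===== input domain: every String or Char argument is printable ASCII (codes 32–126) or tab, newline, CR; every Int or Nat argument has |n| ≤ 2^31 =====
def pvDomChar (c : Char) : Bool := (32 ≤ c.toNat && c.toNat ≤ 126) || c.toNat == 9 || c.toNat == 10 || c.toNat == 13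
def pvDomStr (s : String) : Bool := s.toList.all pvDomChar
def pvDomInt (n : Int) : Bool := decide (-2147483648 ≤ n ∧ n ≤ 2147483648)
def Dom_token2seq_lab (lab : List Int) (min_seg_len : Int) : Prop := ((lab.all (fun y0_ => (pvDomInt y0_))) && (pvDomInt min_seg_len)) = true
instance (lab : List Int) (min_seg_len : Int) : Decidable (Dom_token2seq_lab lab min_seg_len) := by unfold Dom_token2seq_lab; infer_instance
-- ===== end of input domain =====

-- B recomputes the two outputs by two independent passes (run-length encoding for the
-- longest 1-run, a prev/cur zip count for the segment starts) instead of A's fused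
-- index loop; objective: simpler, same cost.

-- ===== PORT A =====
-- loop body of A's single for-loop (indices are always in range, so lab[i] is lab.getD i 0)
def stepA (lab : List Int) (st : Int × Int × Int) (i : Nat) : Int × Int × Int :=
  match st with
  | (best, pos, nseg) =>
    if lab.getD i 0 = 1 then
      (best, pos + 1, if i = 0 ∨ lab.getD (i - 1) 0 = 0 then nseg + 1 else nseg)
    else
      if pos > best then (pos, 0, nseg) else (best, 0, nseg)

def token2seq_lab (lab : List Int) (min_seg_len : Int) : Int × Int :=
  match (List.range lab.length).foldl (stepA lab) (0, 0, 0) with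
  | (best, pos, nseg) =>
    let best2 := if pos > best then pos else best
    ((if best2 ≥ min_seg_len then 1 else 0), nseg)

-- ===== PORT B =====
-- loop body of Source B's run-length encoding (runs[-1] is the newest run)
def stepR (runs : List (Int × Int)) (x : Int) : List (Int × Int) :=
  match runs.getLast? with
  | some (v, n) => if v = x then runs.dropLast ++ [(v, n + 1)] else runs ++ [(x, 1)]
  | none => [(x, 1)]

def pvRle (lab : List Int) : List (Int × Int) :=
  lab.foldl stepR []

-- max(lengths of runs of value 1, default 0)
def onesMax (r : List (Int × Int)) : Int :=
  (r.filterMap (fun p => if p.1 = 1 then some p.2 else none)).foldl max 0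

def token2seq_lab_alt (lab : List Int) (min_seg_len : Int) : Int × Int :=
  let best := onesMax (pvRle lab)
  let nseg : Int := ((((0 : Int) :: lab).zip lab).countP (fun q => q.2 == 1 && q.1 == 0) : Nat)
  ((if best ≥ min_seg_len then 1 else 0), nseg)

-- ===== PRECONDITION & SPEC =====
def Spec_token2seq_lab (lab : List Int) (min_seg_len : Int) (out : Int × Int) : Prop := out = token2seq_lab_alt lab min_seg_len
instance (lab : List Int) (min_seg_len : Int) (out : Int × Int) : Decidable (Spec_token2seq_lab lab min_seg_len out) := by unfold Spec_token2seq_lab; infer_instance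

-- ===== CLAIM (what is proved, stated in full; the proofs are below) =====
def Claim_equal_token2seq_lab : Prop := ∀ (lab : List Int) (min_seg_len : Int), Dom_token2seq_lab lab min_seg_len → Spec_token2seq_lab lab min_seg_len (token2seq_lab lab min_seg_len)

-- ===== LEMMAS AND PROOFS =====

-- newest-run-FIRST variant of the run-length fold, easier to reason about;
-- pvRle produces exactly its reverse (pvRle_eq_reverse below)
def stepF (runs : List (Int × Int)) (x : Int) : List (Int × Int) :=
  match runs with
  | (v, n) :: rest => if v = x then (v, n + 1) :: rest else (x, 1) :: (v, n) :: rest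
  | [] => [(x, 1)]

def rleF (lab : List Int) : List (Int × Int) :=
  lab.foldl stepF []

-- length of the newest (trailing) run, if it is a run of 1s
def trailOf (r : List (Int × Int)) : Int :=
  match r with
  | (v, n) :: _ => if v = 1 then n else 0
  | [] => 0

-- the runs with the trailing 1-run (if any) removed
def restOf (r : List (Int × Int)) : List (Int × Int) :=
  match r with
  | (v, _) :: rest => if v = 1 then rest else r
  | [] => []

theorem foldl_max_init_le (l : List Int) (a : Int) : a ≤ l.foldl max a := by
  induction l generalizing a with
  | nil => simp
  | cons x xs ih => exact le_trans (le_max_left a x) (ih (max a x))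

theorem foldl_max_shift (l : List Int) (a b : Int) :
    l.foldl max (max a b) = max (l.foldl max a) b := by
  induction l generalizing a with
  | nil => simp
  | cons x xs ih =>
    simp only [List.foldl_cons]
    rw [show max (max a b) x = max (max a x) b by
      rw [max_right_comm], ih]

theorem onesMax_nonneg (r : List (Int × Int)) : 0 ≤ onesMax r :=
  foldl_max_init_le _ 0

theorem onesMax_split (r : List (Int × Int)) :
    onesMax r = max (onesMax (restOf r)) (trailOf r) := by
  match r with
  | [] => simp [onesMax, restOf, trailOf]
  | (v, n) :: rest =>
    by_cases hv : v = 1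
    · subst hv
      have h2 : onesMax ((1, n) :: rest) =
          (rest.filterMap (fun p => if p.1 = 1 then some p.2 else none)).foldl max (max 0 n) := by
        simp [onesMax]
      rw [h2, foldl_max_shift]
      simp [restOf, trailOf, onesMax]
    · simp only [restOf, trailOf, if_neg hv]
      exact (max_eq_left (onesMax_nonneg _)).symm

theorem zip_snoc (p : List Int) (a x : Int) :
    (a :: (p ++ [x])).zip (p ++ [x]) = (a :: p).zip p ++ [(p.getLastD a, x)] := by
  induction p generalizing a with
  | nil => simp
  | cons b q ih =>
    simp only [List.cons_append, List.zip_cons_cons, ih b, List.getLastD_cons]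

theorem stepF_one_rest (r : List (Int × Int)) : restOf (stepF r 1) = restOf r := by
  rcases r with _ | ⟨⟨v, n⟩, rest⟩
  · simp [stepF, restOf]
  · by_cases hv : v = 1
    · subst hv; simp [stepF, restOf]
    · simp [stepF, restOf, hv]

theorem stepF_one_trail (r : List (Int × Int)) : trailOf (stepF r 1) = trailOf r + 1 := by
  rcases r with _ | ⟨⟨v, n⟩, rest⟩
  · simp [stepF, trailOf]
  · by_cases hv : v = 1
    · subst hv; simp [stepF, trailOf]
    · simp [stepF, trailOf, hv]

theorem stepF_ne_trail (r : List (Int × Int)) (x : Int) (hx : x ≠ 1) :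
    trailOf (stepF r x) = 0 := by
  rcases r with _ | ⟨⟨v, n⟩, rest⟩
  · simp [stepF, trailOf, hx]
  · by_cases hv : v = x
    · subst hv; simp [stepF, trailOf, hx]
    · simp [stepF, trailOf, hv, hx]

theorem stepF_ne_rest (r : List (Int × Int)) (x : Int) (hx : x ≠ 1) :
    restOf (stepF r x) = stepF r x := by
  rcases r with _ | ⟨⟨v, n⟩, rest⟩
  · simp [stepF, restOf, hx]
  · by_cases hv : v = x
    · subst hv; simp [stepF, restOf, hx]
    · simp [stepF, restOf, hv, hx]

theorem onesMax_stepF_ne (r : List (Int × Int)) (x : Int) (hx : x ≠ 1) :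
    onesMax (stepF r x) = onesMax r := by
  rcases r with _ | ⟨⟨v, n⟩, rest⟩
  · simp [stepF, onesMax, hx]
  · by_cases hv : v = x
    · subst hv; simp [stepF, onesMax, hx]
    · simp only [stepF, if_neg hv, onesMax, List.filterMap_cons, if_neg hx]

theorem getD_last (p : List Int) (d : Int) :
    p.getD (p.length - 1) d = p.getLastD d := by
  induction p generalizing d with
  | nil => rfl
  | cons b q ih =>
    rw [List.getD_eq_getElem?_getD, List.getLastD_eq_getLast?, List.getLast?_eq_getElem?]

theorem stepR_reverse (r : List (Int × Int)) (x : Int) :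
    stepR r.reverse x = (stepF r x).reverse := by
  rcases r with _ | ⟨⟨v, n⟩, rest⟩
  · simp [stepR, stepF]
  · simp only [List.reverse_cons, stepR, stepF, List.getLast?_concat, List.dropLast_concat]
    split_ifs with hv
    · simp
    · simp

theorem pvRle_eq_reverse (lab : List Int) : pvRle lab = (rleF lab).reverse := by
  suffices h : ∀ r : List (Int × Int), lab.foldl stepR r.reverse = (lab.foldl stepF r).reverse by
    simpa using h []
  induction lab with
  | nil => intro r; rfl
  | cons y ys ih =>
    intro r
    simp only [List.foldl_cons, stepR_reverse, ih]

theorem onesMax_reverse (r : List (Int × Int)) : onesMax r.reverse = onesMax r := by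
  simp only [onesMax, List.filterMap_reverse, List.foldl_reverse]
  rw [show (fun (a : Int) (b : Int) => max b a) = max by funext a b; exact max_comm b a]
  exact (List.foldl_eq_foldr _ _).symm

theorem main_state (p : List Int) :
    (List.range p.length).foldl (stepA p) ((0 : Int), (0 : Int), (0 : Int)) =
      (onesMax (restOf (rleF p)), trailOf (rleF p),
        (((((0 : Int) :: p).zip p).countP (fun q => q.2 == 1 && q.1 == 0) : Nat) : Int)) := by
  induction p using List.reverseRecOn with
  | nil => simp [rleF, onesMax, restOf, trailOf]
  | append_singleton q x ih =>
    have hlen : (q ++ [x]).length = q.length + 1 := by simp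
    rw [hlen, List.range_succ, List.foldl_append, List.foldl_cons, List.foldl_nil]
    have hcongr : (List.range q.length).foldl (stepA (q ++ [x])) ((0 : Int), (0 : Int), (0 : Int)) =
        (List.range q.length).foldl (stepA q) ((0 : Int), (0 : Int), (0 : Int)) := by
      apply PySem.List.foldl_congr_mem
      intro acc i hi
      have hi' : i < q.length := List.mem_range.mp hi
      obtain ⟨best, pos, nseg⟩ := acc
      have g1 : (q ++ [x]).getD i 0 = q.getD i 0 := List.getD_append _ _ _ _ hi'
      have g2 : (q ++ [x]).getD (i - 1) 0 = q.getD (i - 1) 0 :=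
        List.getD_append _ _ _ _ (lt_of_le_of_lt (Nat.sub_le i 1) hi')
      simp only [stepA, g1, g2]
    rw [hcongr, ih]
    have hx : (q ++ [x]).getD q.length 0 = x := by simp [List.getD]
    have hr : rleF (q ++ [x]) = stepF (rleF q) x := by simp [rleF, List.foldl_append]
    have hcount : ((((0 : Int) :: (q ++ [x])).zip (q ++ [x])).countP (fun y => y.2 == 1 && y.1 == 0))
        = ((((0 : Int) :: q).zip q).countP (fun y => y.2 == 1 && y.1 == 0))
          + (if x == 1 && q.getLastD 0 == 0 then 1 else 0) := by
      rw [zip_snoc, List.countP_append]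
      simp
    have hprev : (q.length = 0 ∨ (q ++ [x]).getD (q.length - 1) 0 = 0) ↔ q.getLastD 0 = 0 := by
      cases q with
      | nil => simp
      | cons b r =>
        have hlt : (b :: r).length - 1 < (b :: r).length := by simp
        rw [List.getD_append _ _ _ _ hlt, getD_last]
        simp
    by_cases hx1 : x = 1
    · subst hx1
      simp only [stepA, hx, if_true]
      refine Prod.ext ?_ (Prod.ext ?_ ?_)
      · rw [hr, stepF_one_rest]
      · rw [hr, stepF_one_trail]
      · rw [hcount]
        by_cases hp : q.getLastD 0 = 0
        · have hp' : q.getLast?.getD 0 = 0 := by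
            simpa [List.getLastD_eq_getLast?] using hp
          rw [if_pos (hprev.mpr hp)]
          simp [hp']
        · have hp' : ¬ q.getLast?.getD 0 = 0 := by
            simpa [List.getLastD_eq_getLast?] using hp
          rw [if_neg (fun h => hp (hprev.mp h))]
          simp [hp']
    · simp only [stepA, hx, if_neg hx1]
      refine Prod.ext ?_ (Prod.ext ?_ ?_)
      · rw [hr, stepF_ne_rest _ _ hx1, onesMax_stepF_ne _ _ hx1, onesMax_split (rleF q)]
        simp only [max_def]
        split_ifs <;> omega
      · rw [hr, stepF_ne_trail _ _ hx1]
        split_ifs <;> rfl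
      · rw [hcount]
        simp [hx1]
        split_ifs <;> rfl

theorem token2seq_lab_spec : Claim_equal_token2seq_lab := by
  intro lab m _
  unfold Spec_token2seq_lab token2seq_lab token2seq_lab_alt
  rw [main_state, pvRle_eq_reverse, onesMax_reverse]
  simp only []
  refine Prod.ext ?_ rfl
  have h := onesMax_split (rleF lab)
  rw [h]
  simp only [max_def]
  split_ifs <;> omega
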